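-- pv_equiv track=rewrite | github.com/JoshHumpherey/advent-of-code | 2018/day2/solution.py | off_by_one
-- ===== SOURCE A (Python) =====
-- def off_by_one(box1: str, box2: str) -> str:
--     if len(box1) != len(box2):
--         return ""
--
--     common = ""
--     encountered_miss = False
--     for i in range(len(box1)):
--         if box1[i] != box2[i]:
--             if encountered_miss:
--                 return ""
--             encountered_miss = True
--         else:
--             common += box1[i]
--     return common
-- ===== SOURCE B (Python) =====
-- def off_by_one(box1: str, box2: str) -> str:
--     if len(box1) != len(box2):
--         return ""
--     diffs = [i for i, (a, b) in enumerate(zip(box1, box2)) if a != b]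
--     if len(diffs) > 1:
--         return ""
--     if not diffs:
--         return box1
--     i = diffs[0]
--     return box1[:i] + box1[i + 1:]
-- ===== Notes on version B (the rewrite author's own statement) =====
-- stated objective: simpler
-- what changed: Replaces the early-exit character-accumulating loop with a gather pass that lists the differing indices, then builds the answer by slicing out the single differing position (or returning box1 unchanged when there is none).
import Mathlib
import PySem

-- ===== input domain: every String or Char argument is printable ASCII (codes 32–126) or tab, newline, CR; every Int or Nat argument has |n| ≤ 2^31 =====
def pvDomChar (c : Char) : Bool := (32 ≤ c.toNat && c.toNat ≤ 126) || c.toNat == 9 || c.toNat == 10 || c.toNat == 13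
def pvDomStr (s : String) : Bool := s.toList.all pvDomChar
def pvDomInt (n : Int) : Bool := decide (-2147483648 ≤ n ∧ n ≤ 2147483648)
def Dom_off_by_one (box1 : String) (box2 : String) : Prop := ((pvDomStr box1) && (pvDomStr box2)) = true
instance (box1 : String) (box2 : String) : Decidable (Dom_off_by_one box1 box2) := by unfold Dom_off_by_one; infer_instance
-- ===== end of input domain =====

-- B replaces A's early-exit accumulating loop by gathering the differing indices and slicing; objective: simpler.

-- ===== PORT A =====
-- A's for-loop over i in range(len(box1)) with state (common, encountered_miss),
-- with the early `return ""` on the second mismatch; the recursion walks both strings in step.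
def pvLoopA : List Char → List Char → List Char → Bool → List Char
  | a :: as, b :: bs, common, miss =>
    if a ≠ b then
      if miss then [] else pvLoopA as bs common true
    else pvLoopA as bs (common ++ [a]) miss
  | _, _, common, _ => common

def off_by_one (box1 : String) (box2 : String) : String :=
  if box1.toList.length ≠ box2.toList.length then ""
  else String.ofList (pvLoopA box1.toList box2.toList [] false)

-- ===== PORT B =====
def off_by_one_alt (box1 : String) (box2 : String) : String :=
  let l1 := box1.toList
  let l2 := box2.toList
  if l1.length ≠ l2.length then ""
  else
    let diffs := ((PySem.List.enumerate (l1.zip l2) 0).filter (fun p => p.2.1 ≠ p.2.2)).map (fun p => p.1)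
    if diffs.length > 1 then ""
    else
      match diffs with
      | [] => box1
      | i :: _ => String.ofList (PySem.List.slice l1 none (some i) ++ PySem.List.slice l1 (some (i + 1)) none)

-- ===== PRECONDITION & SPEC =====
def Spec_off_by_one (box1 : String) (box2 : String) (out : String) : Prop := out = off_by_one_alt box1 box2
instance (box1 : String) (box2 : String) (out : String) : Decidable (Spec_off_by_one box1 box2 out) := by unfold Spec_off_by_one; infer_instance

-- ===== CLAIM (what is proved, stated in full; the proofs are below) =====
def Claim_equal_off_by_one : Prop := ∀ (box1 : String) (box2 : String), Dom_off_by_one box1 box2 → Spec_off_by_one box1 box2 (off_by_one box1 box2)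

-- ===== LEMMAS AND PROOFS =====

/-- Proof helper: the list of mismatch positions (Nat indices). -/
def diffsN : List Char → List Char → List Nat
  | a :: as, b :: bs =>
    if a = b then (diffsN as bs).map (· + 1) else 0 :: (diffsN as bs).map (· + 1)
  | _, _ => []

lemma loopA_true (as bs acc : List Char) (h : as.length = bs.length) :
    pvLoopA as bs acc true = if diffsN as bs = [] then acc ++ as else [] := by
  induction as generalizing bs acc with
  | nil =>
    cases bs with
    | nil => simp [pvLoopA, diffsN]
    | cons b bs => simp at h
  | cons a as ih =>
    cases bs with
    | nil => simp at h
    | cons b bs =>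
      simp only [List.length_cons, Nat.add_right_cancel_iff] at h
      by_cases hab : a = b
      · subst hab
        simp only [pvLoopA, diffsN, ne_eq, not_true_eq_false, if_false]
        rw [ih bs (acc ++ [a]) h]
        by_cases hd : diffsN as bs = [] <;> simp [hd]
      · simp [pvLoopA, diffsN, hab]

lemma loopA_false (as bs acc : List Char) (h : as.length = bs.length) :
    pvLoopA as bs acc false =
      match diffsN as bs with
      | [] => acc ++ as
      | [i] => acc ++ (as.take i ++ as.drop (i + 1))
      | _ => [] := by
  induction as generalizing bs acc with
  | nil =>
    cases bs with
    | nil => simp [pvLoopA, diffsN]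
    | cons b bs => simp at h
  | cons a as ih =>
    cases bs with
    | nil => simp at h
    | cons b bs =>
      simp only [List.length_cons, Nat.add_right_cancel_iff] at h
      by_cases hab : a = b
      · subst hab
        simp only [pvLoopA, diffsN, ne_eq, not_true_eq_false, if_false]
        rw [ih bs (acc ++ [a]) h]
        cases hd : diffsN as bs with
        | nil => simp
        | cons i t =>
          cases t with
          | nil => simp [List.take_succ_cons, List.drop_succ_cons]
          | cons j t' => simp
      · simp only [pvLoopA, diffsN, ne_eq, hab, not_false_eq_true, if_true]
        rw [loopA_true as bs acc h]
        cases hd : diffsN as bs with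
        | nil => simp
        | cons i t => simp

lemma map_cast_shift (l : List Nat) (s : Int) :
    (l.map (· + 1)).map (fun i : Nat => s + (i : Int)) = l.map (fun i : Nat => (s + 1) + (i : Int)) := by
  rw [List.map_map]
  apply List.map_congr_left
  intro i _
  simp only [Function.comp_apply]
  push_cast
  ring

/-- B's enumerate-filter-map comprehension equals the Nat-index mismatch list, shifted by the start. -/
lemma diffs_eq (as bs : List Char) (s : Int) :
    ((PySem.List.enumerate (as.zip bs) s).filter (fun p => p.2.1 ≠ p.2.2)).map (fun p => p.1)
      = (diffsN as bs).map (fun i : Nat => s + (i : Int)) := by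
  induction as generalizing bs s with
  | nil => simp [diffsN, PySem.List.enumerate_nil]
  | cons a as ih =>
    cases bs with
    | nil => simp [diffsN, PySem.List.enumerate_nil]
    | cons b bs =>
      by_cases hab : a = b
      · subst hab
        simp only [List.zip_cons_cons, PySem.List.enumerate_cons, List.filter_cons, diffsN,
          ne_eq, not_true_eq_false, decide_false, Bool.false_eq_true, if_false,
          if_true, ih bs (s + 1)]
        rw [map_cast_shift]
      · simp only [List.zip_cons_cons, PySem.List.enumerate_cons, List.filter_cons, diffsN,
          ne_eq, hab, not_false_eq_true, decide_true, if_true, if_false,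
          List.map_cons, ih bs (s + 1)]
        rw [map_cast_shift]
        norm_num

-- ===== VERDICT (by name: the statement is the Claim_ definition above) =====
theorem off_by_one_spec : Claim_equal_off_by_one := by
  intro box1 box2 _
  unfold Spec_off_by_one off_by_one off_by_one_alt
  by_cases hl : box1.toList.length = box2.toList.length
  · simp only [hl, ne_eq, not_true_eq_false, if_false]
    rw [loopA_false _ _ _ hl, diffs_eq box1.toList box2.toList 0]
    cases hd : diffsN box1.toList box2.toList with
    | nil => simp
    | cons i t =>
      cases t with
      | nil =>
        simp only [List.map_cons, List.map_nil, List.length_cons, List.length_nil, zero_add]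
        norm_num
        rw [show ((i : Int) + 1) = ((i + 1 : Nat) : Int) from by push_cast; ring]
        rw [PySem.List.slice_from_natCast]
      | cons j t' =>
        have hlen : 1 < (((i :: j :: t').map (fun k : Nat => (0:Int) + (k : Int)))).length := by
          simp
        simp only [if_pos hlen]
  · simp only [hl, ne_eq, not_false_eq_true, if_true]
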